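-- pv_equiv track=rewrite | github.com/spncrlkt/ballgame | offline_training/check_offline_training.py | sanitize_level_name
-- ===== SOURCE A (Python) =====
-- def sanitize_level_name(name: str) -> str:
--     out = []
--     last_underscore = False
--     for ch in name:
--         if ch.isalnum():
--             out.append(ch.lower())
--             last_underscore = False
--         elif not last_underscore:
--             out.append("_")
--             last_underscore = True
--     return "".join(out).strip("_")
-- ===== SOURCE B (Python) =====
-- def sanitize_level_name(name: str) -> str:
--     # Run-based: split into maximal runs of alnum / non-alnum, lowercase alnum runs,
--     # collapse each non-alnum run to a single underscore, then strip edge underscores.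
--     parts = []
--     i = 0
--     n = len(name)
--     while i < n:
--         b = name[i].isalnum()
--         j = i
--         while j < n and name[j].isalnum() == b:
--             j += 1
--         parts.append(name[i:j].lower() if b else '_')
--         i = j
--     return ''.join(parts).strip('_')
-- ===== Notes on version B (the rewrite author's own statement) =====
-- stated objective: alternative
-- what changed: Replaces A's per-character last_underscore state machine with a run decomposition: the string is split into maximal alnum/non-alnum runs, alnum runs are lowercased, each non-alnum run collapses to a single underscore, then edge underscores are stripped.
import Mathlib
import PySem

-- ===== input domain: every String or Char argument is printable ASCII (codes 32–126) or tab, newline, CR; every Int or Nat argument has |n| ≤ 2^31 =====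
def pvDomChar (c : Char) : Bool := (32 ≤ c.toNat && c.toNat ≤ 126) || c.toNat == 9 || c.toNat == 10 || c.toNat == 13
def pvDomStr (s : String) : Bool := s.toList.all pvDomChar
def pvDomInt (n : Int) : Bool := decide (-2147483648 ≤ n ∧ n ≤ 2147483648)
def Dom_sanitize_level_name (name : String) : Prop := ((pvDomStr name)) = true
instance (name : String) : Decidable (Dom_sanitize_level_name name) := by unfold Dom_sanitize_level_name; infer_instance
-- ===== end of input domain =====

-- B replaces A's per-character last_underscore state machine by grouping the string into
-- maximal alnum / non-alnum runs (objective: alternative decomposition, same cost).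

-- ===== PORT A =====
-- per-character loop with (out, last_underscore) state, then ''.join(out).strip('_')
def sanitize_level_name (name : String) : String :=
  let st := name.toList.foldl
    (fun (st : List Char × Bool) ch =>
      if PySem.Chars.isalnum ch then (st.1 ++ [PySem.Chars.lowerChar ch], false)
      else if st.2 = false then (st.1 ++ ['_'], true)
      else st)
    ([], false)
  PySem.Str.stripChars (String.ofList st.1) "_"

-- ===== PORT B =====
-- group into maximal runs of equal isalnum (the inner while = takeWhile/dropWhile)
def pvRuns : List Char → List (Bool × List Char)
  | [] => []
  | c :: cs =>
    (PySem.Chars.isalnum c,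
      c :: cs.takeWhile (fun d => PySem.Chars.isalnum d == PySem.Chars.isalnum c)) ::
      pvRuns (cs.dropWhile (fun d => PySem.Chars.isalnum d == PySem.Chars.isalnum c))
termination_by l => l.length
decreasing_by
  simp only [List.length_cons]
  exact Nat.lt_succ_of_le (List.length_dropWhile_le _ _)

def sanitize_level_name_alt (name : String) : String :=
  let parts := (pvRuns name.toList).map
    (fun p => if p.1 then p.2.map PySem.Chars.lowerChar else ['_'])
  PySem.Str.stripChars (String.ofList parts.flatten) "_"

-- ===== PRECONDITION & SPEC =====
def Spec_sanitize_level_name (name : String) (out : String) : Prop := out = sanitize_level_name_alt name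
instance (name : String) (out : String) : Decidable (Spec_sanitize_level_name name out) := by unfold Spec_sanitize_level_name; infer_instance

-- ===== CLAIM (what is proved, stated in full; the proofs are below) =====
def Claim_equal_sanitize_level_name : Prop := ∀ (name : String), Dom_sanitize_level_name name → Spec_sanitize_level_name name (sanitize_level_name name)

-- ===== LEMMAS AND PROOFS =====

-- A's state machine as a recursion producing the appended characters given last_underscore
def pvA : List Char → Bool → List Char
  | [], _ => []
  | c :: cs, lu =>
    if PySem.Chars.isalnum c then PySem.Chars.lowerChar c :: pvA cs false
    else if lu = false then '_' :: pvA cs true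
    else pvA cs lu

theorem pvA_foldl (l : List Char) (acc : List Char) (lu : Bool) :
    (l.foldl
      (fun (st : List Char × Bool) ch =>
        if PySem.Chars.isalnum ch then (st.1 ++ [PySem.Chars.lowerChar ch], false)
        else if st.2 = false then (st.1 ++ ['_'], true)
        else st)
      (acc, lu)).1 = acc ++ pvA l lu := by
  induction l generalizing acc lu with
  | nil => simp [pvA]
  | cons c cs ih =>
    simp only [List.foldl_cons, pvA]
    by_cases h : PySem.Chars.isalnum c
    · simp [h, ih]
    · by_cases hlu : lu = false
      · simp [h, hlu, ih]
      · simp [h, hlu, ih]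

theorem pvA_alnum_run (run rest : List Char) (h : ∀ c ∈ run, PySem.Chars.isalnum c = true) :
    pvA (run ++ rest) false = run.map PySem.Chars.lowerChar ++ pvA rest false := by
  induction run with
  | nil => simp
  | cons c cs ih =>
    simp only [List.cons_append, pvA, h c (by simp)]
    simp [ih (fun d hd => h d (by simp [hd]))]

theorem pvA_skip_run (run rest : List Char) (h : ∀ c ∈ run, PySem.Chars.isalnum c = false) :
    pvA (run ++ rest) true = pvA rest true := by
  induction run with
  | nil => simp
  | cons c cs ih =>
    simp only [List.cons_append, pvA, h c (by simp)]
    simp [ih (fun d hd => h d (by simp [hd]))]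

theorem pvA_true_eq_false (rest : List Char)
    (h : rest = [] ∨ ∃ d t, rest = d :: t ∧ PySem.Chars.isalnum d = true) :
    pvA rest true = pvA rest false := by
  rcases h with h | ⟨d, t, rfl, hd⟩
  · subst h; rfl
  · simp [pvA, hd]

theorem pvA_eq_runs (l : List Char) :
    pvA l false =
      ((pvRuns l).map (fun p => if p.1 then p.2.map PySem.Chars.lowerChar else ['_'])).flatten := by
  induction l using pvRuns.induct with
  | case1 => simp [pvRuns, pvA]
  | case2 c cs ih =>
    rw [pvRuns]
    simp only [List.map_cons, List.flatten_cons]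
    by_cases hb : PySem.Chars.isalnum c = true
    · simp only [hb, beq_true] at ih ⊢
      rw [pvA, if_pos hb]
      conv_lhs => rw [show cs = cs.takeWhile (fun d => PySem.Chars.isalnum d) ++
        cs.dropWhile (fun d => PySem.Chars.isalnum d) from List.takeWhile_append_dropWhile.symm]
      rw [pvA_alnum_run _ _ (fun d hd => List.mem_takeWhile_imp hd)]
      rw [ih]
      simp
    · have hbf : PySem.Chars.isalnum c = false := eq_false_of_ne_true hb
      simp only [hbf, beq_false] at ih ⊢
      rw [pvA, if_neg (by simpa using hb), if_pos rfl]
      conv_lhs => rw [show cs = cs.takeWhile (fun d => !PySem.Chars.isalnum d) ++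
        cs.dropWhile (fun d => !PySem.Chars.isalnum d) from List.takeWhile_append_dropWhile.symm]
      rw [pvA_skip_run _ _ (fun d hd => by simpa using List.mem_takeWhile_imp hd)]
      have hhead : cs.dropWhile (fun d => !PySem.Chars.isalnum d) = [] ∨
          ∃ d t, cs.dropWhile (fun d => !PySem.Chars.isalnum d) = d :: t ∧
            PySem.Chars.isalnum d = true := by
        rcases hrest : cs.dropWhile (fun d => !PySem.Chars.isalnum d) with _ | ⟨d, t⟩
        · exact Or.inl rfl
        · refine Or.inr ⟨d, t, rfl, ?_⟩
          have hh := List.head?_dropWhile_not (fun d => !PySem.Chars.isalnum d) cs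
          rw [hrest] at hh
          simp only [List.head?_cons] at hh
          simpa using hh
      rw [pvA_true_eq_false _ hhead, ih]
      simp

-- ===== VERDICT (by name: the statement is the Claim_ definition above) =====
theorem sanitize_level_name_spec : Claim_equal_sanitize_level_name := by
  intro name _
  unfold Spec_sanitize_level_name sanitize_level_name sanitize_level_name_alt
  simp only [pvA_foldl name.toList [] false, List.nil_append, pvA_eq_runs]
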